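-- pv_equiv track=rewrite | github.com/joshanashakya/dissertation | workspace/dataset/java-python/GeeksForGeeks/1861/A/2.py | maxOR
-- ===== SOURCE A (Python) =====
-- def maxOR(arr, n, k, x):
--
--     preSum = [0] * (n + 1)
--     suffSum = [0] * (n + 1)
--     pow = 1
--
--     # Compute x^k
--     for i in range(0 ,k):
--         pow *= x
--
--     # Find prefix bitwise OR
--     preSum[0] = 0
--     for i in range(0, n):
--         preSum[i + 1] = preSum[i] | arr[i]
--
--     # Find suffix bitwise OR
--     suffSum[n] = 0
--     for i in range(n-1, -1, -1):
--         suffSum[i] = suffSum[i + 1] | arr[i]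
--
--     # Find maximum OR value
--     res = 0
--     for i in range(0 ,n):
--         res = max(res, preSum[i] |
--            (arr[i] * pow) | suffSum[i + 1])
--
--     return res
-- ===== SOURCE B (Python) =====
-- def maxOR(arr, n, k, x):
--     pow = 1
--     for _ in range(0, k):
--         pow *= x
--     res = 0
--     for i in range(0, n):
--         total = 0
--         for j in range(0, n):
--             total |= arr[i] * pow if j == i else arr[j]
--         res = max(res, total)
--     return res
-- ===== Notes on version B (the rewrite author's own statement) =====
-- stated objective: alternative
-- what changed: Replaced A's prefix-OR/suffix-OR table construction and combining pass with a direct nested rescan that, for each candidate index, re-ORs all other elements together with the multiplied element.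
import Mathlib
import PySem

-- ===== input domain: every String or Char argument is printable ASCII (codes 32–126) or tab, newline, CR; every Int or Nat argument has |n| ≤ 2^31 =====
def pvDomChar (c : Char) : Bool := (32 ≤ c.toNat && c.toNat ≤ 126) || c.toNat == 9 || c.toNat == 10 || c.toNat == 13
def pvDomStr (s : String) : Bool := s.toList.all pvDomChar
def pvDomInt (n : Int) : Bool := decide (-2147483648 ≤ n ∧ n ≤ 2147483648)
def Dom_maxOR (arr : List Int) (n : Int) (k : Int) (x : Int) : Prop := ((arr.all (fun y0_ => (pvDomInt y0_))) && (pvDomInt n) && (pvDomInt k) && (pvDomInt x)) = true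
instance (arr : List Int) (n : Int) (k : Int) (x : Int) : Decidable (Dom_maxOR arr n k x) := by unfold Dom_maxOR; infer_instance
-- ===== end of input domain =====

-- B replaces A's prefix/suffix OR tables by a direct nested rescan of all other
-- elements for each candidate index (alternative decomposition, not faster).

-- ===== PORT A =====
-- All list indices A uses (preSum[i], preSum[i+1], suffSum[i], suffSum[i+1], arr[i])
-- are nonnegative and in range for every input admitted by Pre_maxOR, so List.getD /
-- List.set at .toNat and pyGetD with default 0 are exact there.
def maxOR (arr : List Int) (n : Int) (k : Int) (x : Int) : Int :=
  let preSum := List.replicate (n + 1).toNat (0 : Int)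
  let suffSum := List.replicate (n + 1).toNat (0 : Int)
  let pw := (PySem.List.pyRange 0 k 1).foldl (fun p _ => p * x) 1
  let preSum := preSum.set 0 0
  let preSum := (PySem.List.pyRange 0 n 1).foldl
    (fun ps i => ps.set (i + 1).toNat (PySem.Int.bor (ps.getD i.toNat 0) (PySem.List.pyGetD arr i 0))) preSum
  let suffSum := suffSum.set n.toNat 0
  let suffSum := (PySem.List.pyRange (n - 1) (-1) (-1)).foldl
    (fun ss i => ss.set i.toNat (PySem.Int.bor (ss.getD (i + 1).toNat 0) (PySem.List.pyGetD arr i 0))) suffSum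
  (PySem.List.pyRange 0 n 1).foldl
    (fun res i => max res (PySem.Int.bor (PySem.Int.bor (preSum.getD i.toNat 0) (PySem.List.pyGetD arr i 0 * pw)) (suffSum.getD (i + 1).toNat 0))) 0

-- ===== PORT B =====
def maxOR_alt (arr : List Int) (n : Int) (k : Int) (x : Int) : Int :=
  let pw := (PySem.List.pyRange 0 k 1).foldl (fun p _ => p * x) 1
  (PySem.List.pyRange 0 n 1).foldl
    (fun res i =>
      let total := (PySem.List.pyRange 0 n 1).foldl
        (fun t j => PySem.Int.bor t (if j == i then PySem.List.pyGetD arr i 0 * pw else PySem.List.pyGetD arr j 0)) 0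
      max res total) 0

-- ===== PRECONDITION & SPEC =====
-- Pre_ is exactly where A returns normally: A raises IndexError when n < 0 or n > len(arr).
def Pre_maxOR (arr : List Int) (n : Int) (k : Int) (x : Int) : Prop :=
  0 ≤ n ∧ n ≤ (arr.length : Int)
instance (arr : List Int) (n : Int) (k : Int) (x : Int) : Decidable (Pre_maxOR arr n k x) := by
  unfold Pre_maxOR; infer_instance
def pvWitness_maxOR : List Int × Int × Int × Int := ([1, 2, 4], 3, 2, 3)

def Spec_maxOR (arr : List Int) (n : Int) (k : Int) (x : Int) (out : Int) : Prop := out = maxOR_alt arr n k x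
instance (arr : List Int) (n : Int) (k : Int) (x : Int) (out : Int) : Decidable (Spec_maxOR arr n k x out) := by unfold Spec_maxOR; infer_instance

-- ===== CLAIM (what is proved, stated in full; the proofs are below) =====
def Claim_equal_maxOR : Prop := ∀ (arr : List Int) (n : Int) (k : Int) (x : Int), Dom_maxOR arr n k x → Pre_maxOR arr n k x → Spec_maxOR arr n k x (maxOR arr n k x)

-- ===== LEMMAS AND PROOFS =====

-- associativity of Python's int `|` (PySem.Int.bor), proved via bit vectors

theorem land_add_ldiff (n : Nat) : ∀ m : Nat, (n &&& m) + Nat.ldiff n m = n := by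
  induction n using Nat.binaryRec with
  | zero =>
      intro m
      have h0 : Nat.ldiff 0 m = 0 := Nat.eq_of_testBit_eq (fun k => by simp)
      simp [h0]
  | bit b n ih =>
      intro m
      obtain ⟨c, m', rfl⟩ : ∃ c m', m = Nat.bit c m' :=
        ⟨m.testBit 0, m >>> 1, (Nat.bit_testBit_zero_shiftRight_one m).symm⟩
      rw [Nat.land_bit, Nat.ldiff_bit, Nat.bit_val, Nat.bit_val, Nat.bit_val]
      have hm := ih m'
      cases b <;> cases c <;> simp <;> omega

theorem sub_land (n m : Nat) : n - (n &&& m) = Nat.ldiff n m := by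
  have := land_add_ldiff n m
  have h2 := Nat.and_le_left (n := n) (m := m)
  omega

-- the two's-complement bit of an Int
def tb (a : Int) (k : Nat) : Bool :=
  if 0 ≤ a then a.toNat.testBit k else !((-a - 1).toNat.testBit k)

theorem tb_bor (a b : Int) (k : Nat) : tb (PySem.Int.bor a b) k = (tb a k || tb b k) := by
  by_cases ha : 0 ≤ a <;> by_cases hb : 0 ≤ b
  · have he : PySem.Int.bor a b = ((a.toNat ||| b.toNat : Nat) : Int) := by
      simp only [PySem.Int.bor, if_pos ha, if_pos hb]
    rw [he]
    simp [tb, ha, hb, Nat.testBit_lor]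
  · have he : PySem.Int.bor a b = -((Nat.ldiff (-b - 1).toNat a.toNat : Nat) : Int) - 1 := by
      simp only [PySem.Int.bor, if_pos ha, if_neg hb]
      rw [sub_land]
    rw [he]
    have hneg : ¬ (0 ≤ -((Nat.ldiff (-b - 1).toNat a.toNat : Nat) : Int) - 1) := by
      have := Int.natCast_nonneg (Nat.ldiff (-b - 1).toNat a.toNat); omega
    have htn : (-(-((Nat.ldiff (-b - 1).toNat a.toNat : Nat) : Int) - 1) - 1).toNat
        = Nat.ldiff (-b - 1).toNat a.toNat := by omega
    simp only [tb, if_neg hneg, if_pos ha, if_neg hb, htn, Nat.testBit_ldiff]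
    cases (-b - 1).toNat.testBit k <;> cases a.toNat.testBit k <;> rfl
  · have he : PySem.Int.bor a b = -((Nat.ldiff (-a - 1).toNat b.toNat : Nat) : Int) - 1 := by
      simp only [PySem.Int.bor, if_neg ha, if_pos hb]
      rw [sub_land]
    rw [he]
    have hneg : ¬ (0 ≤ -((Nat.ldiff (-a - 1).toNat b.toNat : Nat) : Int) - 1) := by
      have := Int.natCast_nonneg (Nat.ldiff (-a - 1).toNat b.toNat); omega
    have htn : (-(-((Nat.ldiff (-a - 1).toNat b.toNat : Nat) : Int) - 1) - 1).toNat
        = Nat.ldiff (-a - 1).toNat b.toNat := by omega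
    simp only [tb, if_neg hneg, if_neg ha, if_pos hb, htn, Nat.testBit_ldiff]
    cases (-a - 1).toNat.testBit k <;> cases b.toNat.testBit k <;> rfl
  · have he : PySem.Int.bor a b = -(((-a - 1).toNat &&& (-b - 1).toNat : Nat) : Int) - 1 := by
      simp only [PySem.Int.bor, if_neg ha, if_neg hb]
    rw [he]
    have hneg : ¬ (0 ≤ -(((-a - 1).toNat &&& (-b - 1).toNat : Nat) : Int) - 1) := by
      have := Int.natCast_nonneg ((-a - 1).toNat &&& (-b - 1).toNat); omega
    have htn : (-(-(((-a - 1).toNat &&& (-b - 1).toNat : Nat) : Int) - 1) - 1).toNat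
        = (-a - 1).toNat &&& (-b - 1).toNat := by omega
    simp only [tb, if_neg hneg, if_neg ha, if_neg hb, htn, Nat.testBit_land]
    cases (-a - 1).toNat.testBit k <;> cases (-b - 1).toNat.testBit k <;> rfl

theorem tb_ext {a b : Int} (h : ∀ k, tb a k = tb b k) : a = b := by
  by_cases ha : 0 ≤ a <;> by_cases hb : 0 ≤ b
  · have : a.toNat = b.toNat := Nat.eq_of_testBit_eq (fun k => by
      have hk := h k
      simp only [tb, if_pos ha, if_pos hb] at hk
      exact hk)
    omega
  · exfalso
    have hk := h (a.toNat + (-b - 1).toNat)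
    have h1 : a.toNat.testBit (a.toNat + (-b - 1).toNat) = false :=
      Nat.testBit_eq_false_of_lt
        (lt_of_lt_of_le Nat.lt_two_pow_self (Nat.pow_le_pow_right (by omega) (by omega)))
    have h2 : (-b - 1).toNat.testBit (a.toNat + (-b - 1).toNat) = false :=
      Nat.testBit_eq_false_of_lt
        (lt_of_lt_of_le Nat.lt_two_pow_self (Nat.pow_le_pow_right (by omega) (by omega)))
    simp only [tb, if_pos ha, if_neg hb] at hk
    rw [h1, h2] at hk
    exact absurd hk (by decide)
  · exfalso
    have hk := h (b.toNat + (-a - 1).toNat)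
    have h1 : b.toNat.testBit (b.toNat + (-a - 1).toNat) = false :=
      Nat.testBit_eq_false_of_lt
        (lt_of_lt_of_le Nat.lt_two_pow_self (Nat.pow_le_pow_right (by omega) (by omega)))
    have h2 : (-a - 1).toNat.testBit (b.toNat + (-a - 1).toNat) = false :=
      Nat.testBit_eq_false_of_lt
        (lt_of_lt_of_le Nat.lt_two_pow_self (Nat.pow_le_pow_right (by omega) (by omega)))
    simp only [tb, if_neg ha, if_pos hb] at hk
    rw [h1, h2] at hk
    exact absurd hk (by decide)
  · have : (-a - 1).toNat = (-b - 1).toNat := Nat.eq_of_testBit_eq (fun k => by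
      have hk := h k
      simp only [tb, if_neg ha, if_neg hb] at hk
      exact Bool.not_inj hk)
    omega

theorem bor_assoc (a b c : Int) :
    PySem.Int.bor (PySem.Int.bor a b) c = PySem.Int.bor a (PySem.Int.bor b c) :=
  tb_ext (fun k => by simp only [tb_bor, Bool.or_assoc])

theorem zero_bor (a : Int) : PySem.Int.bor 0 a = a := by
  rw [PySem.Int.bor_comm]; exact PySem.Int.bor_zero a

-- OR of a list, and prefix / suffix ORs of arr (proof helpers only)
def orL (l : List Int) : Int := l.foldl PySem.Int.bor 0
def prefOr (arr : List Int) (i : Int) : Int :=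
  orL ((PySem.List.pyRange 0 i 1).map (fun j => PySem.List.pyGetD arr j 0))
def suffOr (arr : List Int) (n : Int) (i : Int) : Int :=
  orL ((PySem.List.pyRange i n 1).map (fun j => PySem.List.pyGetD arr j 0))

theorem orL_nil : orL [] = 0 := rfl

theorem foldl_or_init (l : List Int) : ∀ a : Int, l.foldl PySem.Int.bor a = PySem.Int.bor a (orL l) := by
  induction l with
  | nil => intro a; exact (PySem.Int.bor_zero a).symm
  | cons y t ih =>
      intro a
      show t.foldl PySem.Int.bor (PySem.Int.bor a y) = PySem.Int.bor a (orL (y :: t))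
      have h2 : orL (y :: t) = PySem.Int.bor y (orL t) := by
        show t.foldl PySem.Int.bor (PySem.Int.bor 0 y) = _
        rw [ih (PySem.Int.bor 0 y), zero_bor]
      rw [ih (PySem.Int.bor a y), h2, bor_assoc]

theorem orL_cons (y : Int) (l : List Int) : orL (y :: l) = PySem.Int.bor y (orL l) := by
  show l.foldl PySem.Int.bor (PySem.Int.bor 0 y) = _
  rw [foldl_or_init l (PySem.Int.bor 0 y), zero_bor]

theorem orL_append (l1 l2 : List Int) : orL (l1 ++ l2) = PySem.Int.bor (orL l1) (orL l2) := by
  simp only [orL, List.foldl_append]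
  rw [foldl_or_init l2 (l1.foldl PySem.Int.bor 0)]
  rfl

theorem orL_single (x : Int) : orL [x] = x := by
  rw [orL_cons, orL_nil, PySem.Int.bor_zero]

theorem prefOr_zero (arr : List Int) : prefOr arr 0 = 0 := by
  simp only [prefOr]
  rw [PySem.List.pyRange_one_eq_nil (le_refl 0)]
  rfl

theorem prefOr_succ (arr : List Int) (c : Int) (hc : 0 ≤ c) :
    prefOr arr (c + 1) = PySem.Int.bor (prefOr arr c) (PySem.List.pyGetD arr c 0) := by
  simp only [prefOr]
  rw [PySem.List.pyRange_one_succ_right hc, List.map_append, orL_append, List.map_cons,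
    List.map_nil, orL_single]

theorem suffOr_self (arr : List Int) (n : Int) : suffOr arr n n = 0 := by
  simp only [suffOr]
  rw [PySem.List.pyRange_one_eq_nil (le_refl n)]
  rfl

theorem suffOr_cons (arr : List Int) (n c : Int) (hc : c < n) :
    suffOr arr n c = PySem.Int.bor (PySem.List.pyGetD arr c 0) (suffOr arr n (c + 1)) := by
  simp only [suffOr]
  rw [PySem.List.pyRange_one_cons hc, List.map_cons, orL_cons]

-- invariant of A's prefix-OR table loop
def InvP (arr : List Int) (n c : Int) (ps : List Int) : Prop :=
  ps.length = n.toNat + 1 ∧ ∀ j : Nat, ps.getD j 0 = if (j : Int) ≤ c then prefOr arr j else 0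

theorem getD_set_self (l : List Int) (i : Nat) (v : Int) (h : i < l.length) :
    (l.set i v).getD i 0 = v := by
  simp [List.getD_eq_getElem?_getD, List.getElem?_set, h]

theorem getD_set_ne (l : List Int) (i j : Nat) (v : Int) (h : i ≠ j) :
    (l.set i v).getD j 0 = l.getD j 0 := by
  simp [List.getD_eq_getElem?_getD, List.getElem?_set, h]

theorem getD_set_replicate (m k j : Nat) :
    ((List.replicate m (0 : Int)).set k 0).getD j 0 = 0 := by
  rw [List.getD_eq_getElem?_getD]
  rcases h : ((List.replicate m (0 : Int)).set k 0)[j]? with _ | v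
  · rfl
  · have hv := List.mem_of_getElem? h
    rcases List.mem_or_eq_of_mem_set hv with hm | rfl
    · simp [List.eq_of_mem_replicate hm]
    · rfl

theorem stepP (arr : List Int) (n c : Int) (ps : List Int) (h0 : 0 ≤ c) (hc : c < n)
    (hinv : InvP arr n c ps) :
    InvP arr n (c + 1)
      (ps.set (c + 1).toNat (PySem.Int.bor (ps.getD c.toNat 0) (PySem.List.pyGetD arr c 0))) := by
  obtain ⟨hlen, hval⟩ := hinv
  refine ⟨by simpa using hlen, ?_⟩
  intro j
  by_cases hj : j = (c + 1).toNat
  · subst hj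
    have hcc : ((c.toNat : Nat) : Int) = c := by omega
    have h1 : (((c + 1).toNat : Nat) : Int) = c + 1 := by omega
    rw [getD_set_self _ _ _ (by omega), hval c.toNat, hcc, h1,
      if_pos (le_refl c), if_pos (le_refl (c + 1))]
    exact (prefOr_succ arr c h0).symm
  · rw [getD_set_ne _ _ _ _ (fun h => hj h.symm), hval j]
    by_cases hle : (j : Int) ≤ c
    · rw [if_pos hle, if_pos (by omega)]
    · rw [if_neg hle, if_neg (by omega)]

theorem loopP (arr : List Int) (n : Int) :
    ∀ (t : Nat) (a : Int) (ps : List Int), a + t = n → 0 ≤ a → InvP arr n a ps →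
    InvP arr n n ((PySem.List.pyRange a n 1).foldl
      (fun ps i => ps.set (i + 1).toNat
        (PySem.Int.bor (ps.getD i.toNat 0) (PySem.List.pyGetD arr i 0))) ps) := by
  intro t
  induction t with
  | zero =>
      intro a ps han _ hinv
      have : a = n := by omega
      subst this
      rw [PySem.List.pyRange_one_eq_nil (le_refl a)]
      simpa using hinv
  | succ t ih =>
      intro a ps han h0 hinv
      have hlt : a < n := by omega
      rw [PySem.List.pyRange_one_cons hlt, List.foldl_cons]
      exact ih (a + 1) _ (by omega) (by omega) (stepP arr n a ps h0 hlt hinv)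

-- invariant of A's suffix-OR table loop
def InvS (arr : List Int) (n c : Int) (ss : List Int) : Prop :=
  ss.length = n.toNat + 1 ∧
    ∀ j : Nat, ss.getD j 0 = if c ≤ (j : Int) ∧ (j : Int) ≤ n then suffOr arr n j else 0

theorem stepS (arr : List Int) (n c : Int) (ss : List Int) (h0 : 0 ≤ c) (hc : c < n)
    (hinv : InvS arr n (c + 1) ss) :
    InvS arr n c
      (ss.set c.toNat (PySem.Int.bor (ss.getD (c + 1).toNat 0) (PySem.List.pyGetD arr c 0))) := by
  obtain ⟨hlen, hval⟩ := hinv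
  refine ⟨by simpa using hlen, ?_⟩
  intro j
  by_cases hj : j = c.toNat
  · subst hj
    have hcc : ((c.toNat : Nat) : Int) = c := by omega
    have h1 : (((c + 1).toNat : Nat) : Int) = c + 1 := by omega
    rw [getD_set_self _ _ _ (by omega), hval (c + 1).toNat, h1, hcc,
      if_pos (by omega : c + 1 ≤ c + 1 ∧ c + 1 ≤ n),
      if_pos (by omega : c ≤ c ∧ c ≤ n)]
    rw [suffOr_cons arr n c hc]
    exact PySem.Int.bor_comm _ _
  · rw [getD_set_ne _ _ _ _ (fun h => hj h.symm), hval j]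
    by_cases hin : c + 1 ≤ (j : Int) ∧ (j : Int) ≤ n
    · rw [if_pos hin, if_pos (by omega)]
    · rw [if_neg hin, if_neg (by omega)]

theorem loopS (arr : List Int) (n : Int) :
    ∀ (t : Nat) (a : Int) (ss : List Int), (a + 1).toNat = t → a ≤ n - 1 → -1 ≤ a →
    InvS arr n (a + 1) ss →
    InvS arr n 0 ((PySem.List.pyRange a (-1) (-1)).foldl
      (fun ss i => ss.set i.toNat
        (PySem.Int.bor (ss.getD (i + 1).toNat 0) (PySem.List.pyGetD arr i 0))) ss) := by
  intro t
  induction t with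
  | zero =>
      intro a ss hat _ hm1 hinv
      have : a = -1 := by omega
      subst this
      rw [PySem.List.pyRange_neg_one_eq_nil (by omega)]
      simpa using hinv
  | succ t ih =>
      intro a ss hat han hm1 hinv
      have h0 : 0 ≤ a := by omega
      rw [PySem.List.pyRange_neg_one_cons (by omega : (-1 : Int) < a), List.foldl_cons]
      have hstep := stepS arr n a ss h0 (by omega) hinv
      exact ih (a - 1) _ (by omega) (by omega) (by omega)
        (by rw [show a - 1 + 1 = a from by ring]; exact hstep)

-- B's inner fold, rewritten through orL
theorem foldl_bor_f (f : Int → Int) (l : List Int) :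
    ∀ a : Int, l.foldl (fun t j => PySem.Int.bor t (f j)) a = PySem.Int.bor a (orL (l.map f)) := by
  induction l with
  | nil => intro a; exact (PySem.Int.bor_zero a).symm
  | cons y t ih =>
      intro a
      simp only [List.foldl_cons, List.map_cons, ih, orL_cons]
      rw [bor_assoc]

-- B's inner rescan equals prefix OR | modified element | suffix OR
theorem inner_eq (arr : List Int) (n pw i : Int) (h0 : 0 ≤ i) (hi : i < n) :
    (PySem.List.pyRange 0 n 1).foldl
      (fun t j => PySem.Int.bor t
        (if j == i then PySem.List.pyGetD arr i 0 * pw else PySem.List.pyGetD arr j 0)) 0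
    = PySem.Int.bor (PySem.Int.bor (prefOr arr i) (PySem.List.pyGetD arr i 0 * pw))
        (suffOr arr n (i + 1)) := by
  rw [show (fun t j => PySem.Int.bor t
        (if j == i then PySem.List.pyGetD arr i 0 * pw else PySem.List.pyGetD arr j 0))
      = (fun t j => PySem.Int.bor t
        ((fun j => if j == i then PySem.List.pyGetD arr i 0 * pw else PySem.List.pyGetD arr j 0) j))
      from rfl]
  rw [foldl_bor_f, zero_bor]
  rw [PySem.List.pyRange_one_append 0 i n h0 (le_of_lt hi), PySem.List.pyRange_one_cons hi]
  rw [List.map_append, List.map_cons, orL_append, orL_cons]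
  have hl : (PySem.List.pyRange 0 i 1).map
      (fun j => if j == i then PySem.List.pyGetD arr i 0 * pw else PySem.List.pyGetD arr j 0)
      = (PySem.List.pyRange 0 i 1).map (fun j => PySem.List.pyGetD arr j 0) := by
    apply List.map_congr_left
    intro j hj
    have hmem := (PySem.List.mem_pyRange_one).1 hj
    have hne : j ≠ i := by omega
    simp [hne]
  have hr : (PySem.List.pyRange (i + 1) n 1).map
      (fun j => if j == i then PySem.List.pyGetD arr i 0 * pw else PySem.List.pyGetD arr j 0)
      = (PySem.List.pyRange (i + 1) n 1).map (fun j => PySem.List.pyGetD arr j 0) := by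
    apply List.map_congr_left
    intro j hj
    have hmem := (PySem.List.mem_pyRange_one).1 hj
    have hne : j ≠ i := by omega
    simp [hne]
  rw [hl, hr]
  simp only [BEq.rfl, if_true]
  simp only [prefOr, suffOr]
  rw [bor_assoc]

theorem maxOR_eq_alt (arr : List Int) (n k x : Int) (h0 : 0 ≤ n) (hn : n ≤ (arr.length : Int)) :
    maxOR arr n k x = maxOR_alt arr n k x := by
  simp only [maxOR, maxOR_alt]
  have hInit : InvP arr n 0 ((List.replicate (n + 1).toNat (0 : Int)).set 0 0) := by
    constructor
    · simp; omega
    · intro j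
      rw [getD_set_replicate]
      by_cases hj : (j : Int) ≤ 0
      · have hj0 : j = 0 := by omega
        subst hj0
        rw [if_pos hj]
        simp [prefOr_zero]
      · rw [if_neg hj]
  have hP := loopP arr n n.toNat 0 _ (by omega) (le_refl 0) hInit
  have hInitS : InvS arr n n ((List.replicate (n + 1).toNat (0 : Int)).set n.toNat 0) := by
    constructor
    · simp; omega
    · intro j
      rw [getD_set_replicate]
      by_cases hj : n ≤ (j : Int) ∧ (j : Int) ≤ n
      · have hjn : ((j : Nat) : Int) = n := by omega
        rw [if_pos hj, hjn, suffOr_self]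
      · rw [if_neg hj]
  have hS := loopS arr n (n - 1 + 1).toNat (n - 1) _ rfl (by omega) (by omega)
    (by rw [show n - 1 + 1 = n from by ring]; exact hInitS)
  apply PySem.List.foldl_congr_mem
  intro acc i hi
  obtain ⟨hi0, hin⟩ := (PySem.List.mem_pyRange_one).1 hi
  rw [inner_eq arr n _ i hi0 hin]
  rw [hP.2 i.toNat, hS.2 (i + 1).toNat]
  have hci : ((i.toNat : Nat) : Int) = i := by omega
  have hci1 : (((i + 1).toNat : Nat) : Int) = i + 1 := by omega
  rw [hci, hci1, if_pos (by omega : i ≤ n), if_pos (by omega : (0 : Int) ≤ i + 1 ∧ i + 1 ≤ n)]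

-- ===== VERDICT (by name: the statement is the Claim_ definition above) =====
theorem maxOR_spec : Claim_equal_maxOR := by
  intro arr n k x _ hpre
  exact maxOR_eq_alt arr n k x hpre.1 hpre.2
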